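-- pv_equiv track=rewrite | github.com/cboldwyn/dc-label | app.py | calculate_individual_case_quantities
-- ===== SOURCE A (Python) =====
-- def calculate_individual_case_quantities(quantity, units_per_case):
--     """Calculate the quantity for each individual case label."""
--     if quantity <= 0 or units_per_case <= 0:
--         return []
--
--     quantities = []
--     remaining = quantity
--
--     while remaining > 0:
--         if remaining >= units_per_case:
--             quantities.append(units_per_case)
--             remaining -= units_per_case
--         else:
--             quantities.append(remaining)
--             remaining = 0
--
--     return quantities
-- ===== SOURCE B (Python) =====
-- def calculate_individual_case_quantities(quantity, units_per_case):
--     """Calculate the quantity for each individual case label."""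
--     if quantity <= 0 or units_per_case <= 0:
--         return []
--     full, rem = divmod(quantity, units_per_case)
--     return [units_per_case] * full + ([rem] if rem else [])
-- ===== Notes on version B (the rewrite author's own statement) =====
-- stated objective: simpler
-- what changed: Replaces the repeated-subtraction while-loop with a closed-form divmod and a single list construction ([units_per_case]*full + optional remainder).
import Mathlib
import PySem

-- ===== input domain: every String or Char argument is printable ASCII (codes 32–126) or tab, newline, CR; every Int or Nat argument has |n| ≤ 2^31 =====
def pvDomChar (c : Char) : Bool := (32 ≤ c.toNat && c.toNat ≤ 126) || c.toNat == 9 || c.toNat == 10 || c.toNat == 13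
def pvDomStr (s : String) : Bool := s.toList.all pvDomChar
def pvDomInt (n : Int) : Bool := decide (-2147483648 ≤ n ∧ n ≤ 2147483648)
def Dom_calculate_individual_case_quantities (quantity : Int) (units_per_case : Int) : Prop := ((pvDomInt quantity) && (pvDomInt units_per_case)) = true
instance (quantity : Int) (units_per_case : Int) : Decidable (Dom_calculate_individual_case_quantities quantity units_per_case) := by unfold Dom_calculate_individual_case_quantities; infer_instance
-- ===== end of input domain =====

-- B replaces A's repeated-subtraction while-loop with a closed-form divmod and one list construction (simpler).

-- ===== PORT A =====
-- while-loop of A: repeated subtraction; terminates because units_per_case > 0 at every call site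
def caseLoop (u : Int) (hu : 0 < u) (r : Int) : List Int :=
  if _h : r ≤ 0 then []
  else if r ≥ u then u :: caseLoop u hu (r - u)
  else [r]
termination_by r.toNat
decreasing_by omega

def calculate_individual_case_quantities (quantity : Int) (units_per_case : Int) : List Int :=
  if h : quantity ≤ 0 ∨ units_per_case ≤ 0 then []
  else caseLoop units_per_case (by omega) quantity

-- ===== PORT B =====
def calculate_individual_case_quantities_alt (quantity : Int) (units_per_case : Int) : List Int :=
  if quantity ≤ 0 ∨ units_per_case ≤ 0 then []
  else
    let full := PySem.Int.floordiv quantity units_per_case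
    let rem := PySem.Int.mod quantity units_per_case
    List.replicate full.toNat units_per_case ++ (if rem ≠ 0 then [rem] else [])

-- ===== PRECONDITION & SPEC =====
def Spec_calculate_individual_case_quantities (quantity : Int) (units_per_case : Int) (out : List Int) : Prop := out = calculate_individual_case_quantities_alt quantity units_per_case
instance (quantity : Int) (units_per_case : Int) (out : List Int) : Decidable (Spec_calculate_individual_case_quantities quantity units_per_case out) := by unfold Spec_calculate_individual_case_quantities; infer_instance

-- ===== CLAIM (what is proved, stated in full; the proofs are below) =====
def Claim_equal_calculate_individual_case_quantities : Prop := ∀ (quantity : Int) (units_per_case : Int), Dom_calculate_individual_case_quantities quantity units_per_case → Spec_calculate_individual_case_quantities quantity units_per_case (calculate_individual_case_quantities quantity units_per_case)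

-- ===== LEMMAS AND PROOFS =====

-- closed form of the repeated-subtraction loop (stated with Lean's ediv/emod; u > 0)
theorem caseLoop_eq (u : Int) (hu : 0 < u) (r : Int) (hr : 0 ≤ r) :
    caseLoop u hu r =
      List.replicate (r / u).toNat u ++ (if r % u ≠ 0 then [r % u] else []) := by
  revert hr
  induction r using caseLoop.induct u hu with
  | case1 r h =>
    intro hr
    have h0 : r = 0 := le_antisymm h hr
    subst h0
    simp [caseLoop]
  | case2 r h1 h2 ih =>
    intro _
    rw [caseLoop]
    simp only [h1, h2, if_false, if_true, dite_eq_ite]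
    have hrw : r = (r - u) + 1 * u := by ring
    have hne : u ≠ 0 := by omega
    have hdiv : r / u = (r - u) / u + 1 := by
      conv_lhs => rw [hrw]
      rw [Int.add_mul_ediv_right _ _ hne]
    have hmod : r % u = (r - u) % u := by
      conv_lhs => rw [hrw]
      exact Int.add_mul_emod_self_right _ 1 u
    have hsub : (0:Int) ≤ r - u := by omega
    have hdn : 0 ≤ (r - u) / u := Int.ediv_nonneg hsub (le_of_lt hu)
    rw [ih hsub, hdiv, hmod]
    have : ((r - u) / u + 1).toNat = ((r - u) / u).toNat + 1 := by omega
    rw [this, List.replicate_succ]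
    simp
  | case3 r h1 h2 =>
    intro _
    rw [caseLoop]
    rw [dif_neg h1, if_neg h2]
    have hr0 : 0 < r := by omega
    have hlt : r < u := by omega
    have hdiv : r / u = 0 := Int.ediv_eq_zero_of_lt (le_of_lt hr0) hlt
    have hmod : r % u = r := Int.emod_eq_of_lt (le_of_lt hr0) hlt
    rw [hdiv, hmod]
    simp [if_neg (by omega : ¬ r = 0)]

-- ===== VERDICT (by name: the statement is the Claim_ definition above) =====
theorem calculate_individual_case_quantities_spec : Claim_equal_calculate_individual_case_quantities := by
  intro q u _
  unfold Spec_calculate_individual_case_quantities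
  unfold calculate_individual_case_quantities calculate_individual_case_quantities_alt
  by_cases h : q ≤ 0 ∨ u ≤ 0
  · rw [dif_pos h, if_pos h]
  · rw [dif_neg h, if_neg h]
    push Not at h
    obtain ⟨hq, hu⟩ := h
    rw [caseLoop_eq u (by omega) q (le_of_lt hq)]
    rw [PySem.Int.floordiv_eq_ediv_of_pos hu, PySem.Int.mod_eq_emod_of_pos hu]
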